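-- pv_equiv track=rewrite | github.com/Berteun/adventofcode2015 | day16/day16.py | part2
-- ===== SOURCE A (Python) =====
-- analysis = {
--     "children": 3,
--     "cats": 7,
--     "samoyeds": 2,
--     "pomeranians": 3,
--     "akitas": 0,
--     "vizslas": 0,
--     "goldfish": 5,
--     "trees": 3,
--     "cars": 2,
--     "perfumes": 1,
-- }
--
-- def part2(sues):
--     real_sues = []
--     for i, sue in enumerate(sues):
--         for k, v in sue.items():
--             if k in ("cats", "trees"):
--                 if analysis[k] >= v:
--                     break
--             elif k in ("pomeranians", "goldfish"):
--                 if analysis[k] <= v: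
--                     break
--             else:
--                 if analysis[k] != v:
--                     break
--         else:
--             real_sues.append(i + 1)
--     assert len(real_sues) == 1, "too many aunts found"
--     return real_sues[0]
-- ===== SOURCE B (Python) =====
-- analysis = {
--     "children": 3,
--     "cats": 7,
--     "samoyeds": 2,
--     "pomeranians": 3,
--     "akitas": 0,
--     "vizslas": 0,
--     "goldfish": 5,
--     "trees": 3,
--     "cars": 2,
--     "perfumes": 1,
-- }
--
--
-- def part2(sues):
--     # Sieve transposed over the analysis: start from all candidates and run one
--     # filtering stage per analysed attribute; a sue that does not mention the
--     # attribute is unconstrained by that stage.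
--     candidates = list(enumerate(sues, 1))
--     for key, target in analysis.items():
--         if key in ("cats", "trees"):
--             keep = lambda v, t=target: v > t
--         elif key in ("pomeranians", "goldfish"):
--             keep = lambda v, t=target: v < t
--         else:
--             keep = lambda v, t=target: v == t
--         candidates = [(i, s) for i, s in candidates if key not in s or keep(s[key])]
--     assert len(candidates) == 1, "too many aunts found"
--     return candidates[0][0]
-- ===== Notes on version B (the rewrite author's own statement) =====
-- stated objective: alternative
-- what changed: Transposes the iteration: instead of A's per-sue inner scan with break/for-else over each sue's attributes, B keeps a candidate list of all sues and runs one filtering stage per analysis attribute (ten successive passes), a sue not mentioning the attribute being unconstrained by that stage; the surviving candidate's 1-based index is returned after the same single-match assert.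
import Mathlib
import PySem

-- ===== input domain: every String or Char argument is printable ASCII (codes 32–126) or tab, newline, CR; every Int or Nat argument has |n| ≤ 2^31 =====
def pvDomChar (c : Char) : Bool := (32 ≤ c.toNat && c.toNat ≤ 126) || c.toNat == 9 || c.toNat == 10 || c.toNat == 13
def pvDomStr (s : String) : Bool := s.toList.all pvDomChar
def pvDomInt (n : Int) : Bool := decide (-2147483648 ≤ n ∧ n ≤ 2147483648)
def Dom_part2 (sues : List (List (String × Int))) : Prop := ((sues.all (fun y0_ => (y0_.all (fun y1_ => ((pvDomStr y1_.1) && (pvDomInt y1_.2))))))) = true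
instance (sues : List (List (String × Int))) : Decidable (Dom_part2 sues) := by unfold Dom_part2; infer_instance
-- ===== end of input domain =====

-- B transposes the iteration: a candidate sieve filtered once per analysis attribute
-- (ten staged passes) instead of A's per-sue attribute scan with break/for-else.

-- ===== PORT A =====
-- the module-level `analysis` dict (A's copy)
def analysisA : PySem.Dict String Int :=
  PySem.Dict.ofList [("children", 3), ("cats", 7), ("samoyeds", 2), ("pomeranians", 3),
    ("akitas", 0), ("vizslas", 0), ("goldfish", 5), ("trees", 3), ("cars", 2), ("perfumes", 1)]

-- inner `for k, v in sue.items()` with break / for-else: some true = no break,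
-- some false = break, none = KeyError
def part2CheckA : List (String × Int) → Option Bool
  | [] => some true
  | (k, v) :: rest =>
    match analysisA.get? k with
    | none => none
    | some a =>
      if k = "cats" ∨ k = "trees" then
        if a ≥ v then some false else part2CheckA rest
      else if k = "pomeranians" ∨ k = "goldfish" then
        if a ≤ v then some false else part2CheckA rest
      else
        if a ≠ v then some false else part2CheckA rest

-- outer `for i, sue in enumerate(sues)` building real_sues; none = KeyError propagated
def part2LoopA : List (List (String × Int)) → Int → Option (List Int)
  | [], _ => some []
  | sue :: rest, i =>
    match part2CheckA sue with
    | none => none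
    | some true => (part2LoopA rest (i + 1)).map (fun l => (i + 1) :: l)
    | some false => part2LoopA rest (i + 1)

def part2 (sues : List (List (String × Int))) : Int :=
  match part2LoopA sues 0 with
  | some [x] => x
  | _ => 0   -- KeyError or failed `assert len(real_sues) == 1`: excluded by Pre_part2

-- ===== PORT B =====
-- the module-level `analysis` dict (B's copy)
def analysisB : PySem.Dict String Int :=
  PySem.Dict.ofList [("children", 3), ("cats", 7), ("samoyeds", 2), ("pomeranians", 3),
    ("akitas", 0), ("vizslas", 0), ("goldfish", 5), ("trees", 3), ("cars", 2), ("perfumes", 1)]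

-- the selected `keep` lambda for one analysis attribute
def part2Keep (key : String) (target : Int) : Int → Bool :=
  if key = "cats" ∨ key = "trees" then fun v => decide (v > target)
  else if key = "pomeranians" ∨ key = "goldfish" then fun v => decide (v < target)
  else fun v => decide (v = target)

-- `key not in s or keep(s[key])` (sue is a dict: first-match lookup)
def part2SueOK (sue : List (String × Int)) (key : String) (keep : Int → Bool) : Bool :=
  match (PySem.Dict.mk sue).get? key with
  | none => true
  | some v => keep v

def part2_alt (sues : List (List (String × Int))) : Int :=
  -- candidates = list(enumerate(sues, 1)); one filtering stage per analysis item
  let cands := analysisB.items.foldl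
    (fun cands kt => cands.filter (fun c => part2SueOK c.2 kt.1 (part2Keep kt.1 kt.2)))
    (PySem.List.enumerate sues 1)
  -- assert len(candidates) == 1 (failure excluded by Pre_part2); return candidates[0][0]
  if cands.length = 1 then (cands.headD (0, [])).1 else 0

-- ===== PRECONDITION & SPEC =====
def part2Keys : List String :=
  ["children", "cats", "samoyeds", "pomeranians", "akitas", "vizslas", "goldfish", "trees",
   "cars", "perfumes"]

-- one attribute passes A's scan: a known analysis key satisfying the puzzle's range rule
def part2Pass (p : String × Int) : Bool :=
  if p.1 = "cats" then 7 < p.2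
  else if p.1 = "trees" then 3 < p.2
  else if p.1 = "pomeranians" then p.2 < 3
  else if p.1 = "goldfish" then p.2 < 5
  else if p.1 = "children" then p.2 = 3
  else if p.1 = "samoyeds" then p.2 = 2
  else if p.1 = "akitas" then p.2 = 0
  else if p.1 = "vizslas" then p.2 = 0
  else if p.1 = "cars" then p.2 = 2
  else if p.1 = "perfumes" then p.2 = 1
  else false

-- the scan of one sue ends without a KeyError: the first non-passing attribute, if any,
-- still has a known key (A breaks there instead of raising)
def part2ScanOK (sue : List (String × Int)) : Bool :=
  match sue.dropWhile part2Pass with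
  | [] => true
  | p :: _ => decide (p.1 ∈ part2Keys)

-- Pre_ excludes exactly the inputs on which the Python A raises — a sue whose scan reaches
-- an attribute key outside the analysis (KeyError), or a number of fully-matching sues other
-- than 1 (AssertionError) — plus, only at this Lean level, association lists carrying a
-- duplicated attribute key inside one sue: a Python dict cannot hold duplicate keys, so that
-- clause excludes no Python input, merely the accidental encodings of the convention.
def Pre_part2 (sues : List (List (String × Int))) : Prop :=
  (∀ sue ∈ sues, part2ScanOK sue = true ∧ (sue.map Prod.fst).Nodup) ∧
    sues.countP (·.all part2Pass) = 1

instance (sues : List (List (String × Int))) : Decidable (Pre_part2 sues) := by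
  unfold Pre_part2; infer_instance

def pvWitness_part2 : (List (List (String × Int))) := [[("cats", 8), ("children", 3)]]

def Spec_part2 (sues : List (List (String × Int))) (out : Int) : Prop := out = part2_alt sues
instance (sues : List (List (String × Int))) (out : Int) : Decidable (Spec_part2 sues out) := by unfold Spec_part2; infer_instance

-- ===== CLAIM (what is proved, stated in full; the proofs are below) =====
def Claim_equal_part2 : Prop := ∀ (sues : List (List (String × Int))), Dom_part2 sues → Pre_part2 sues → Spec_part2 sues (part2 sues)

-- ===== LEMMAS AND PROOFS =====

-- "every attribute of the sue whose key the analysis knows satisfies its rule"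
def part2Inv (sue : List (String × Int)) : Bool :=
  sue.all (fun p => !(decide (p.1 ∈ part2Keys)) || part2Pass p)

-- B's acceptance of one sue: it survives all ten stages
def part2BAccept (sue : List (String × Int)) : Bool :=
  analysisB.items.all (fun kt => part2SueOK sue kt.1 (part2Keep kt.1 kt.2))

theorem analysisA_eq : analysisA = PySem.Dict.mk [("children", 3), ("cats", 7), ("samoyeds", 2),
    ("pomeranians", 3), ("akitas", 0), ("vizslas", 0), ("goldfish", 5), ("trees", 3),
    ("cars", 2), ("perfumes", 1)] := rfl

-- a passing attribute does not break A's scan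
theorem checkA_cons_pass (k : String) (v : Int) (rest : List (String × Int))
    (hk : k ∈ part2Keys) (hp : part2Pass (k, v) = true) :
    part2CheckA ((k, v) :: rest) = part2CheckA rest := by
  unfold part2Pass at hp; simp only at hp
  fin_cases hk <;>
    · simp only [part2CheckA, analysisA_eq]
      simp_all [PySem.Dict.get?_mk_cons]
      try omega

-- a failing known-key attribute breaks A's scan
theorem checkA_cons_fail (k : String) (v : Int) (rest : List (String × Int))
    (hk : k ∈ part2Keys) (hp : ¬ part2Pass (k, v) = true) :
    part2CheckA ((k, v) :: rest) = some false := by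
  unfold part2Pass at hp; simp only at hp
  fin_cases hk <;>
    · simp only [part2CheckA, analysisA_eq]
      simp_all [PySem.Dict.get?_mk_cons]
      try omega

-- A's scan never raises under ScanOK and computes "all attributes pass"
theorem checkA_eq (sue : List (String × Int)) (h : part2ScanOK sue = true) :
    part2CheckA sue = some (sue.all part2Pass) := by
  induction sue with
  | nil => rfl
  | cons p rest ih =>
    obtain ⟨k, v⟩ := p
    by_cases hp : part2Pass (k, v) = true
    · have hrest : part2ScanOK rest = true := by
        unfold part2ScanOK at h ⊢
        rwa [List.dropWhile_cons_of_pos hp] at h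
      have hk : k ∈ part2Keys := by
        unfold part2Pass at hp
        simp only at hp
        split_ifs at hp with h1 h2 h3 h4 h5 h6 h7 h8 h9 h10 <;>
          simp_all [part2Keys]
      rw [checkA_cons_pass k v rest hk hp, ih hrest, List.all_cons, hp, Bool.true_and]
    · have hk : k ∈ part2Keys := by
        unfold part2ScanOK at h
        rw [List.dropWhile_cons_of_neg (by simp [hp])] at h
        simpa using h
      have hne : (((k, v) :: rest).all part2Pass) = false := by
        simp [List.all_cons, hp]
      rw [hne, checkA_cons_fail k v rest hk hp]

-- under ScanOK, "all attributes pass" = "all known-key attributes pass"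
theorem all_eq_inv (sue : List (String × Int)) (h : part2ScanOK sue = true) :
    sue.all part2Pass = part2Inv sue := by
  induction sue with
  | nil => rfl
  | cons p rest ih =>
    by_cases hp : part2Pass p = true
    · have hrest : part2ScanOK rest = true := by
        unfold part2ScanOK at h ⊢
        rwa [List.dropWhile_cons_of_pos hp] at h
      simp [part2Inv, List.all_cons, hp] at ih ⊢
      exact ih hrest
    · have hk : p.1 ∈ part2Keys := by
        unfold part2ScanOK at h
        rw [List.dropWhile_cons_of_neg (by simp [hp])] at h
        simpa using h
      simp [part2Inv, List.all_cons, hp, hk]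

-- unfolding one attribute of the sue under B's stage test
theorem sueOK_cons (k' : String) (v' : Int) (rest : List (String × Int)) (key : String)
    (keep : Int → Bool) :
    part2SueOK ((k', v') :: rest) key keep
      = if k' == key then keep v' else part2SueOK rest key keep := by
  simp only [part2SueOK, PySem.Dict.get?_mk_cons]
  by_cases h : (k' == key) = true <;> simp [h]

-- each stage's selected keep-lambda decides exactly part2Pass for its key
theorem keep_eq_pass (kt : String × Int) (hkt : kt ∈ analysisB.items) (w : Int) :
    part2Keep kt.1 kt.2 w = part2Pass (kt.1, w) := by
  fin_cases hkt <;> simp [part2Keep, part2Pass]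

theorem keys_eq : part2Keys = analysisB.items.map Prod.fst := by rfl

-- with unique keys, one stage passes iff every attribute with that key satisfies keep
theorem sueOK_iff (sue : List (String × Int)) (key : String) (keep : Int → Bool)
    (h : (sue.map Prod.fst).Nodup) :
    part2SueOK sue key keep = true ↔ ∀ p ∈ sue, p.1 = key → keep p.2 = true := by
  induction sue with
  | nil => simp [part2SueOK, PySem.Dict.get?]
  | cons q rest ih =>
    obtain ⟨k', v'⟩ := q
    simp only [List.map_cons, List.nodup_cons] at h
    obtain ⟨hk', hrest⟩ := h
    rw [sueOK_cons]
    by_cases he : k' = key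
    · subst he
      simp only [beq_self_eq_true, if_true]
      constructor
      · intro hkv p hp hpk
        rcases List.mem_cons.mp hp with rfl | hp'
        · exact hkv
        · exact absurd (hpk ▸ List.mem_map_of_mem hp') hk'
      · intro hall; exact hall (k', v') (by simp) rfl
    · rw [if_neg (by simpa using he), ih hrest]
      constructor
      · intro hall p hp hpk
        rcases List.mem_cons.mp hp with rfl | hp'
        · exact absurd hpk he
        · exact hall p hp' hpk
      · intro hall p hp hpk; exact hall p (by simp [hp]) hpk

-- with unique keys, surviving all ten stages = every known-key attribute passes
theorem bAccept_eq_inv (sue : List (String × Int)) (h : (sue.map Prod.fst).Nodup) :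
    part2BAccept sue = part2Inv sue := by
  rw [Bool.eq_iff_iff]
  unfold part2BAccept part2Inv
  simp only [List.all_eq_true]
  constructor
  · intro hall p hp
    by_cases hm : p.1 ∈ part2Keys
    · rw [keys_eq] at hm
      obtain ⟨kt, hkt, hfst⟩ := List.mem_map.mp hm
      have := (sueOK_iff sue kt.1 (part2Keep kt.1 kt.2) h).mp (hall kt hkt) p hp hfst.symm
      rw [keep_eq_pass kt hkt p.2, hfst] at this
      simp [← hfst, this]
    · simp [hm]
  · intro hall kt hkt
    rw [sueOK_iff sue kt.1 (part2Keep kt.1 kt.2) h]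
    intro p hp hpk
    have hm : p.1 ∈ part2Keys := by rw [keys_eq, hpk]; exact List.mem_map_of_mem hkt
    have := hall p hp
    rw [Bool.or_eq_true, Bool.not_eq_true'] at this
    rcases this with hfalse | hpass
    · simp [hm] at hfalse
    · rw [keep_eq_pass kt hkt p.2, ← hpk]
      exact (by simpa using hpass : part2Pass p = true)

-- the ten-stage foldl of filters is one filter by the conjunction of all stages
theorem foldl_filter_eq {α β : Type} (items : List β) (P : β → α → Bool) (init : List α) :
    items.foldl (fun cs kt => cs.filter (P kt)) init
      = init.filter (fun c => items.all (fun kt => P kt c)) := by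
  induction items generalizing init with
  | nil => simp
  | cons kt rest ih =>
    simp only [List.foldl_cons, ih, List.filter_filter, List.all_cons]
    congr 1
    funext c
    rw [Bool.and_comm]

-- A's outer loop, when no sue raises, collects the enumerated indices of accepted sues
theorem loopA_eq (l : List (List (String × Int))) (i : Int)
    (h : ∀ sue ∈ l, part2ScanOK sue = true) :
    part2LoopA l i
      = some (((PySem.List.enumerate l (i + 1)).filter (fun c => c.2.all part2Pass)).map (·.1)) := by
  induction l generalizing i with
  | nil => rfl
  | cons sue rest ih =>
    have hsue := h sue (by simp)
    have hrest : ∀ s ∈ rest, part2ScanOK s = true := fun s hs => h s (by simp [hs])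
    rw [PySem.List.enumerate_cons]
    simp only [part2LoopA, checkA_eq sue hsue, ih (i + 1) hrest]
    by_cases hb : sue.all part2Pass = true
    · simp [hb]
    · rw [Bool.not_eq_true] at hb
      simp [hb]

-- filtering an enumeration by a property of the element counts like countP
theorem length_filter_enumerate (l : List (List (String × Int))) (s : Int)
    (q : List (String × Int) → Bool) :
    ((PySem.List.enumerate l s).filter (fun c => q c.2)).length = l.countP q := by
  induction l generalizing s with
  | nil => rfl
  | cons x rest ih =>
    rw [PySem.List.enumerate_cons, List.filter_cons, List.countP_cons]
    by_cases hq : q x = true <;> simp [hq, ih]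

-- ===== VERDICT (by name: the statement is the Claim_ definition above) =====
theorem part2_spec : Claim_equal_part2 := by
  intro sues _hdom hpre
  obtain ⟨hall, hcount⟩ := hpre
  unfold Spec_part2 part2 part2_alt
  -- both sides reduce to the same filtered enumeration
  have hfold := foldl_filter_eq analysisB.items
    (fun kt c => part2SueOK c.2 kt.1 (part2Keep kt.1 kt.2)) (PySem.List.enumerate sues 1)
  have hcongr : (PySem.List.enumerate sues 1).filter
        (fun c => analysisB.items.all (fun kt => part2SueOK c.2 kt.1 (part2Keep kt.1 kt.2)))
      = (PySem.List.enumerate sues 1).filter (fun c => c.2.all part2Pass) := by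
    apply List.filter_congr
    intro c hc
    have hmem : c.2 ∈ sues := by
      have := PySem.List.map_snd_enumerate sues 1
      exact this ▸ List.mem_map_of_mem hc
    obtain ⟨hsc, hnd⟩ := hall c.2 hmem
    show part2BAccept c.2 = c.2.all part2Pass
    rw [bAccept_eq_inv c.2 hnd, all_eq_inv c.2 hsc]
  have hlen : ((PySem.List.enumerate sues 1).filter (fun c => c.2.all part2Pass)).length = 1 := by
    exact Eq.trans (length_filter_enumerate sues 1 (fun l => l.all part2Pass)) hcount
  obtain ⟨c, hc⟩ := List.length_eq_one_iff.mp hlen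
  have hA := loopA_eq sues 0 (fun s hs => (hall s hs).1)
  norm_num at hA
  simp only [hA, hfold, hcongr, hc]
  simp
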